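-- pv_equiv track=rewrite | github.com/VadimKominch/sha3 | python/sha3.py | rc
-- ===== SOURCE A (Python) =====
-- def rc(t):
--     if(t % 255 == 0):
--         return 1
--     r = 128
--     for i in range(0,t%255):
--         r = r^((r&1)<<8)
--         r = r^((r&1)<<4)
--         r = r^((r&1)<<3)
--         r = r^((r&1)<<2)
--         r = r>>1
--     return r>>7
-- ===== SOURCE B (Python) =====
-- # Keccak rc(t) via a precomputed 255-entry LFSR output table: rc(t) = _RC[t % 255].
-- _RC = (
--     1, 0, 0, 0, 0, 0, 0, 0, 1, 0, 1, 1, 0, 0, 0, 1, 1, 1, 1, 0, 1, 0, 0, 0, 0, 1, 1, 1, 1, 1, 1, 1, 1, 0, 0, 1, 0, 0, 0, 0, 1, 0, 1, 0, 0, 1, 1, 1, 1, 1, 0,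
--     1, 0, 1, 0, 1, 0, 1, 1, 1, 0, 0, 0, 0, 0, 1, 1, 0, 0, 0, 1, 0, 1, 0, 1, 1, 0, 0, 1, 1, 0, 0, 1, 0, 1, 1, 1, 1, 1, 1, 0, 1, 1, 1, 1, 0, 0, 1, 1, 0, 1, 1,
--     1, 0, 1, 1, 1, 0, 0, 1, 0, 1, 0, 1, 0, 0, 1, 0, 1, 0, 0, 0, 1, 0, 0, 1, 0, 1, 1, 0, 1, 0, 0, 0, 1, 1, 0, 0, 1, 1, 1, 0, 0, 1, 1, 1, 1, 0, 0, 0, 1, 1, 0,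
--     1, 1, 0, 0, 0, 0, 1, 0, 0, 0, 1, 0, 1, 1, 1, 0, 1, 0, 1, 1, 1, 1, 0, 1, 1, 0, 1, 1, 1, 1, 1, 0, 0, 0, 0, 1, 1, 0, 1, 0, 0, 1, 1, 0, 1, 0, 1, 1, 0, 1, 1,
--     0, 1, 0, 1, 0, 0, 0, 0, 0, 1, 0, 0, 1, 1, 1, 0, 1, 1, 0, 0, 1, 0, 0, 1, 0, 0, 1, 1, 0, 0, 0, 0, 0, 0, 1, 1, 1, 0, 1, 0, 0, 1, 0, 0, 0, 1, 1, 1, 0, 0, 0,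
-- )
--
--
-- def rc(t):
--     return _RC[t % 255]
-- ===== Notes on version B (the rewrite author's own statement) =====
-- stated objective: idiomatic
-- what changed: Replaces the per-call LFSR iteration loop by a single lookup into a hardcoded table of all 255 LFSR outputs, indexed by the reduced argument.
import Mathlib
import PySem

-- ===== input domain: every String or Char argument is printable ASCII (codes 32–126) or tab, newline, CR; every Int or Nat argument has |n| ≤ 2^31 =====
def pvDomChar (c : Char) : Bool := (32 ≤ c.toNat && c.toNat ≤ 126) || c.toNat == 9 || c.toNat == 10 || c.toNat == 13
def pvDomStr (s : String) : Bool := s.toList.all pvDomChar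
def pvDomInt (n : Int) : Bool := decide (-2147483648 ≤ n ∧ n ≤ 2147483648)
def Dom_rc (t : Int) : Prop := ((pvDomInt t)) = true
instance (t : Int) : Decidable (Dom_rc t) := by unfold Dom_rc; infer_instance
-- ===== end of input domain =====

-- B replaces A's per-call LFSR loop by a hardcoded 255-entry output table indexed by t % 255 (alternative decomposition).


-- ===== PORT A =====
def rc (t : Int) : Int :=
  if PySem.Int.mod t 255 = 0 then 1
  else
    let r : Int :=
      (PySem.List.pyRange 0 (PySem.Int.mod t 255) 1).foldl (fun r _i =>
        let r := PySem.Int.bxor r ((PySem.Int.band r 1) <<< 8)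
        let r := PySem.Int.bxor r ((PySem.Int.band r 1) <<< 4)
        let r := PySem.Int.bxor r ((PySem.Int.band r 1) <<< 3)
        let r := PySem.Int.bxor r ((PySem.Int.band r 1) <<< 2)
        r >>> 1) 128
    r >>> 7

-- ===== PORT B =====
def rcTable : List Int := [
  1, 0, 0, 0, 0, 0, 0, 0, 1, 0, 1, 1, 0, 0, 0, 1, 1, 1, 1, 0, 1, 0, 0, 0, 0, 1, 1, 1, 1, 1, 1, 1, 1, 0, 0, 1, 0, 0, 0, 0, 1, 0, 1, 0, 0, 1, 1, 1, 1, 1, 0,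
  1, 0, 1, 0, 1, 0, 1, 1, 1, 0, 0, 0, 0, 0, 1, 1, 0, 0, 0, 1, 0, 1, 0, 1, 1, 0, 0, 1, 1, 0, 0, 1, 0, 1, 1, 1, 1, 1, 1, 0, 1, 1, 1, 1, 0, 0, 1, 1, 0, 1, 1,
  1, 0, 1, 1, 1, 0, 0, 1, 0, 1, 0, 1, 0, 0, 1, 0, 1, 0, 0, 0, 1, 0, 0, 1, 0, 1, 1, 0, 1, 0, 0, 0, 1, 1, 0, 0, 1, 1, 1, 0, 0, 1, 1, 1, 1, 0, 0, 0, 1, 1, 0,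
  1, 1, 0, 0, 0, 0, 1, 0, 0, 0, 1, 0, 1, 1, 1, 0, 1, 0, 1, 1, 1, 1, 0, 1, 1, 0, 1, 1, 1, 1, 1, 0, 0, 0, 0, 1, 1, 0, 1, 0, 0, 1, 1, 0, 1, 0, 1, 1, 0, 1, 1,
  0, 1, 0, 1, 0, 0, 0, 0, 0, 1, 0, 0, 1, 1, 1, 0, 1, 1, 0, 0, 1, 0, 0, 1, 0, 0, 1, 1, 0, 0, 0, 0, 0, 0, 1, 1, 1, 0, 1, 0, 0, 1, 0, 0, 0, 1, 1, 1, 0, 0, 0]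


-- _RC[t % 255]: the index is always in [0, 255), so the default of pyGetD is never used
def rc_alt (t : Int) : Int := PySem.List.pyGetD rcTable (PySem.Int.mod t 255) 0

-- ===== PRECONDITION & SPEC =====
def Spec_rc (t : Int) (out : Int) : Prop := out = rc_alt t
instance (t : Int) (out : Int) : Decidable (Spec_rc t out) := by unfold Spec_rc; infer_instance

-- ===== CLAIM (what is proved, stated in full; the proofs are below) =====
def Claim_equal_rc : Prop := ∀ (t : Int), Dom_rc t → Spec_rc t (rc t)

-- ===== LEMMAS AND PROOFS =====
theorem pv_mod_idem (t : Int) :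
    PySem.Int.mod (PySem.Int.mod t 255) 255 = PySem.Int.mod t 255 := by
  rw [PySem.Int.mod_eq_emod_of_pos (by norm_num), PySem.Int.mod_eq_emod_of_pos (by norm_num)]
  omega

theorem rc_depends_on_mod (t : Int) : rc t = rc (PySem.Int.mod t 255) := by
  unfold rc
  rw [pv_mod_idem]

theorem rc_alt_depends_on_mod (t : Int) : rc_alt t = rc_alt (PySem.Int.mod t 255) := by
  unfold rc_alt
  rw [pv_mod_idem]

set_option maxRecDepth 4000 in
set_option maxHeartbeats 1000000 in
theorem rc_eq_alt_small : ∀ n : Nat, n < 255 → rc (n : Int) = rc_alt (n : Int) := by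
  decide

-- ===== VERDICT (by name: the statement is the Claim_ definition above) =====
theorem rc_spec : Claim_equal_rc := by
  intro t _
  unfold Spec_rc
  rw [rc_depends_on_mod, rc_alt_depends_on_mod]
  have h0 : (0:Int) ≤ PySem.Int.mod t 255 := by
    rw [PySem.Int.mod_eq_emod_of_pos (by norm_num)]; omega
  have h1 : PySem.Int.mod t 255 < 255 := by
    rw [PySem.Int.mod_eq_emod_of_pos (by norm_num)]; omega
  obtain ⟨n, hn⟩ := Int.eq_ofNat_of_zero_le h0
  rw [hn]
  exact rc_eq_alt_small n (by omega)
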